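-- pv_equiv track=rewrite | github.com/Julesc013/eureka | runtime/gateway/public_api/public_search.py | _compatibility_confidence
-- ===== SOURCE A (Python) =====
-- from typing import Any, Mapping, Sequence
--
-- def _compatibility_confidence(evidence: Sequence[Mapping[str, Any]]) -> str:
--     confidences = {
--         str(item.get("confidence"))
--         for item in evidence
--         if isinstance(item, Mapping) and item.get("confidence")
--     }
--     if "high" in confidences:
--         return "high"
--     if "medium" in confidences:
--         return "medium"
--     if "low" in confidences:
--         return "low"
--     return "unknown"
-- ===== SOURCE B (Python) =====
-- from typing import Any, Mapping, Sequence
--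
-- def _rank(value: str) -> int:
--     if value == "high":
--         return 3
--     if value == "medium":
--         return 2
--     if value == "low":
--         return 1
--     return 0
--
-- def _compatibility_confidence(evidence: Sequence[Mapping[str, Any]]) -> str:
--     best = 0
--     for item in evidence:
--         if isinstance(item, Mapping) and item.get("confidence"):
--             r = _rank(str(item.get("confidence")))
--             if r > best:
--                 best = r
--     if best == 3:
--         return "high"
--     if best == 2:
--         return "medium"
--     if best == 1:
--         return "low"
--     return "unknown"
-- ===== Notes on version B (the rewrite author's own statement) =====
-- stated objective: simpler
-- what changed: Instead of building a set of all confidence strings and probing it three times, B folds once over the evidence keeping a single integer best-rank accumulator (high=3, medium=2, low=1, other=0) and translates the final rank back to a string.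
import Mathlib
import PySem

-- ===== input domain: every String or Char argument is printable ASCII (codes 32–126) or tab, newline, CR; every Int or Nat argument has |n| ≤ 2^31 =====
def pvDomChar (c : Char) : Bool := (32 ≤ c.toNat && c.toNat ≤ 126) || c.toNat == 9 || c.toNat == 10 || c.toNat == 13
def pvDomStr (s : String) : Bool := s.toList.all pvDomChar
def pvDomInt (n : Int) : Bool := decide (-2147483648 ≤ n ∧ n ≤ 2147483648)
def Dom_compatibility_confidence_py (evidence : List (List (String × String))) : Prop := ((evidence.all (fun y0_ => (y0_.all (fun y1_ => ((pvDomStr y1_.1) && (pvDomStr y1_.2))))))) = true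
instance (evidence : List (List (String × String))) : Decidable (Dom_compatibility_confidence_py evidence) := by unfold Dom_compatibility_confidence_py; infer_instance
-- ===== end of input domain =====

-- B replaces A's set comprehension + three membership probes by a single fold keeping an
-- integer best-rank accumulator, mapped back to a string at the end (objective: simpler).

-- ===== PORT A =====
-- truthy 'item.get("confidence")' under the type convention: key present with a non-empty
-- string value; then str(...) is the string itself (exact on String-valued dicts)
def pvConf? (item : List (String × String)) : Option String :=
  match List.lookup "confidence" item with
  | some s => if s ≠ "" then some s else none
  | none => none

def compatibility_confidence_py (evidence : List (List (String × String))) : String :=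
  let confidences : PySem.Set String := PySem.Set.ofList (evidence.filterMap pvConf?)
  if PySem.Set.contains confidences "high" then "high"
  else if PySem.Set.contains confidences "medium" then "medium"
  else if PySem.Set.contains confidences "low" then "low"
  else "unknown"

-- ===== PORT B =====
def pvRank (value : String) : Nat :=
  if value = "high" then 3
  else if value = "medium" then 2
  else if value = "low" then 1
  else 0

def compatibility_confidence_py_alt (evidence : List (List (String × String))) : String :=
  let best := evidence.foldl (fun best item =>
    match List.lookup "confidence" item with
    | some s => if s ≠ "" then (let r := pvRank s; if r > best then r else best) else best
    | none => best) 0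
  if best = 3 then "high"
  else if best = 2 then "medium"
  else if best = 1 then "low"
  else "unknown"

-- ===== PRECONDITION & SPEC =====
def Spec_compatibility_confidence_py (evidence : List (List (String × String))) (out : String) : Prop := out = compatibility_confidence_py_alt evidence
instance (evidence : List (List (String × String))) (out : String) : Decidable (Spec_compatibility_confidence_py evidence out) := by unfold Spec_compatibility_confidence_py; infer_instance

-- ===== CLAIM (what is proved, stated in full; the proofs are below) =====
def Claim_equal_compatibility_confidence_py : Prop := ∀ (evidence : List (List (String × String))), Dom_compatibility_confidence_py evidence → Spec_compatibility_confidence_py evidence (compatibility_confidence_py evidence)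

-- ===== LEMMAS AND PROOFS =====

-- the rank an item contributes in B: pvRank of its confidence when truthy, else 0
def pvItemRank (item : List (String × String)) : Nat :=
  match pvConf? item with
  | some s => pvRank s
  | none => 0

-- the maximum rank over the evidence
def pvBest (evidence : List (List (String × String))) : Nat :=
  (evidence.map pvItemRank).foldr max 0

lemma pvItemRank_le (item : List (String × String)) : pvItemRank item ≤ 3 := by
  unfold pvItemRank pvRank
  split
  · split_ifs <;> omega
  · omega

-- B's fold step equals taking the max with pvItemRank
lemma step_eq_max (b : Nat) (item : List (String × String)) :
    (match List.lookup "confidence" item with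
     | some s => if s ≠ "" then (let r := pvRank s; if r > b then r else b) else b
     | none => b) = max b (pvItemRank item) := by
  unfold pvItemRank pvConf?
  rcases h : List.lookup "confidence" item with _ | s <;> simp
  by_cases hs : s = "" <;> simp [hs]
  split_ifs <;> omega

lemma foldr_max_comm (l : List Nat) (b c : Nat) :
    List.foldr max (max b c) l = max c (List.foldr max b l) := by
  induction l with
  | nil => simp [Nat.max_comm]
  | cons x xs ih =>
    simp only [List.foldr_cons, ih]
    omega

lemma fold_eq_max (evidence : List (List (String × String))) (b : Nat) :
    evidence.foldl (fun best item =>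
      match List.lookup "confidence" item with
      | some s => if s ≠ "" then (let r := pvRank s; if r > best then r else best) else best
      | none => best) b
    = (evidence.map pvItemRank).foldr max b := by
  induction evidence generalizing b with
  | nil => rfl
  | cons item rest ih =>
    rw [List.foldl_cons, step_eq_max, ih, List.map_cons, List.foldr_cons, foldr_max_comm]

lemma pvBest_le (evidence : List (List (String × String))) : pvBest evidence ≤ 3 := by
  unfold pvBest
  induction evidence with
  | nil => simp
  | cons item rest ih =>
    have := pvItemRank_le item
    simp only [List.map_cons, List.foldr_cons]
    omega

lemma pvBest_ge (evidence : List (List (String × String))) (item : List (String × String))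
    (h : item ∈ evidence) : pvItemRank item ≤ pvBest evidence := by
  unfold pvBest
  induction evidence with
  | nil => cases h
  | cons y ys ih =>
    rcases List.mem_cons.mp h with rfl | h
    · simp only [List.map_cons, List.foldr_cons]; omega
    · have := ih h
      simp only [List.map_cons, List.foldr_cons]
      omega

lemma pvBest_mem (evidence : List (List (String × String))) :
    pvBest evidence = 0 ∨ ∃ item ∈ evidence, pvItemRank item = pvBest evidence := by
  unfold pvBest
  induction evidence with
  | nil => left; rfl
  | cons y ys ih =>
    simp only [List.map_cons, List.foldr_cons]
    rcases Nat.le_total (pvItemRank y) ((ys.map pvItemRank).foldr max 0) with h | h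
    · rw [Nat.max_eq_right h]
      rcases ih with h0 | ⟨it, hm, he⟩
      · left; exact h0
      · right; exact ⟨it, List.mem_cons_of_mem _ hm, he⟩
    · rw [Nat.max_eq_left h]
      right; exact ⟨y, List.mem_cons_self, rfl⟩

-- rank value r ∈ {1,2,3} characterizes the confidence string
lemma itemRank_eq_iff (item : List (String × String)) (r : Nat) (s : String)
    (hr : pvRank s = r) (hs : r = 3 ∨ r = 2 ∨ r = 1) :
    pvItemRank item = r ↔ pvConf? item = some s := by
  unfold pvItemRank
  rcases h : pvConf? item with _ | t
  · simp; omega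
  · simp only [Option.some.injEq]
    constructor
    · intro ht
      unfold pvRank at ht hr
      split_ifs at ht hr <;> simp_all <;> omega
    · intro h; rw [h, hr]

-- no item carries the string s of rank r when every rank stays below r
lemma exists_conf_false (evidence : List (List (String × String))) (s : String) (r : Nat)
    (hr : pvRank s = r) (hs : r = 3 ∨ r = 2 ∨ r = 1) (h : pvBest evidence < r) :
    ¬ ∃ a ∈ evidence, pvConf? a = some s := by
  rintro ⟨it, hm, hc⟩
  have h1 := (itemRank_eq_iff it r s hr hs).mpr hc
  have h2 := pvBest_ge evidence it hm
  omega

-- some item carries the string s of rank r when the maximum rank equals r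
lemma exists_conf_true (evidence : List (List (String × String))) (s : String) (r : Nat)
    (hr : pvRank s = r) (hs : r = 3 ∨ r = 2 ∨ r = 1) (h : pvBest evidence = r) :
    ∃ a ∈ evidence, pvConf? a = some s := by
  rcases pvBest_mem evidence with h0 | ⟨it, hm, he⟩
  · omega
  · exact ⟨it, hm, (itemRank_eq_iff it r s hr hs).mp (by omega)⟩

-- ===== VERDICT (by name: the statement is the Claim_ definition above) =====
theorem compatibility_confidence_py_spec : Claim_equal_compatibility_confidence_py := by
  intro ev _
  unfold Spec_compatibility_confidence_py compatibility_confidence_py compatibility_confidence_py_alt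
  simp only [fold_eq_max]
  rw [show List.foldr max 0 (List.map pvItemRank ev) = pvBest ev from rfl]
  have hle := pvBest_le ev
  rcases hbest : pvBest ev with _ | _ | _ | _ | n
  · simp [exists_conf_false ev "high" 3 rfl (by omega) (by omega),
          exists_conf_false ev "medium" 2 rfl (by omega) (by omega),
          exists_conf_false ev "low" 1 rfl (by omega) (by omega)]
  · simp [exists_conf_false ev "high" 3 rfl (by omega) (by omega),
          exists_conf_false ev "medium" 2 rfl (by omega) (by omega),
          exists_conf_true ev "low" 1 rfl (by omega) (by omega)]
  · simp [exists_conf_false ev "high" 3 rfl (by omega) (by omega),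
          exists_conf_true ev "medium" 2 rfl (by omega) (by omega)]
  · simp [exists_conf_true ev "high" 3 rfl (by omega) (by omega)]
  · omega
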